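-- pv_equiv track=rewrite | github.com/TeeRenJing/AOC-2021 | Advent of Code 2021/day6 part 2 (HARD QN BASED ON QUEUES).py | determineimpactoutputarr
-- ===== SOURCE A (Python) =====
-- def determineimpactoutputarr(fish,days):
--     workarr = [fish]
--     for j in range(0,days):
--         for i in range(0,len(workarr)):
--             if workarr[i] == 0:
--                 workarr.append(8)
--                 workarr[i] = 6
--             else:
--                 workarr[i] -= 1
--     return workarr
-- ===== SOURCE B (Python) =====
-- def determineimpactoutputarr(fish, days):
--     # Alternative algorithm: counting DP over birthday cohorts instead of per-fish simulation.
--     o = fish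
--     counts = [0] * 9          # offspring population by timer value
--     births = []               # number of fish born on each day
--     for _ in range(days):
--         b = counts[0] + (1 if o == 0 else 0)
--         if o == 0:
--             o = 6
--         else:
--             o = o - 1
--         new = counts[1:] + [b]
--         new[6] += counts[0]
--         counts = new
--         births.append(b)
--     out = [o]
--     for idx, b in enumerate(births):
--         d = days - (idx + 1)  # days the cohort lives after birth
--         val = 8 - d if d < 9 else 6 - (d - 9) % 7
--         out.extend([val] * b)
--     return out
-- ===== Notes on version B (the rewrite author's own statement) =====
-- stated objective: alternative
-- what changed: A simulates every individual fish every day; B instead runs a size-9 counting DP over birthday cohorts (plus a direct simulation of the single original fish) and reconstructs the array as runs of identical cohort values from a closed-form timer formula.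
import Mathlib
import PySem

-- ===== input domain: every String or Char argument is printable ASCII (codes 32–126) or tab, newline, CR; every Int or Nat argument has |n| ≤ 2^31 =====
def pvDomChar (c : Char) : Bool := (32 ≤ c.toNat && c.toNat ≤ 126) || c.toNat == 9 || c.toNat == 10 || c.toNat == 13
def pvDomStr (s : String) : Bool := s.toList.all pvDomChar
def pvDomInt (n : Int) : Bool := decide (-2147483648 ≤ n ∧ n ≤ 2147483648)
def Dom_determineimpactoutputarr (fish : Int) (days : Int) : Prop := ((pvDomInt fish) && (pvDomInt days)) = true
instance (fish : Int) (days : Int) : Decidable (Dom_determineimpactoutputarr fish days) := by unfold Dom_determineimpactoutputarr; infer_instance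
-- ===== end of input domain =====

-- B replaces A's per-fish per-day simulation by a size-9 counting DP over birthday
-- cohorts plus cohort-run reconstruction (an alternative algorithm, same return value).

-- ===== PORT A =====
def determineimpactoutputarr (fish : Int) (days : Int) : List Int :=
  (PySem.List.pyRange 0 days 1).foldl
    (fun workarr _ =>
      (PySem.List.pyRange 0 (workarr.length : Int) 1).foldl
        (fun a i =>
          if PySem.List.pyGetD a i 0 = 0 then
            PySem.List.pySetD (a ++ [8]) i 6
          else
            PySem.List.pySetD a i (PySem.List.pyGetD a i 0 - 1))
        workarr)
    [fish]

-- ===== PORT B =====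
def determineimpactoutputarr_alt (fish : Int) (days : Int) : List Int :=
  let st :=
    (PySem.List.pyRange 0 days 1).foldl
      (fun (st : Int × List Int × List Int) _ =>
        let o := st.1
        let counts := st.2.1
        let births := st.2.2
        let b := PySem.List.pyGetD counts 0 0 + (if o = 0 then 1 else 0)
        let o' := if o = 0 then 6 else o - 1
        let nw := PySem.List.slice counts (some 1) none ++ [b]
        let nw2 := PySem.List.pySetD nw 6 (PySem.List.pyGetD nw 6 0 + PySem.List.pyGetD counts 0 0)
        (o', nw2, births ++ [b]))
      (fish, List.replicate 9 (0 : Int), ([] : List Int))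
  (PySem.List.enumerate st.2.2 0).foldl
    (fun out p =>
      let d := days - (p.1 + 1)
      let val := if d < 9 then 8 - d else 6 - PySem.Int.mod (d - 9) 7
      out ++ List.replicate p.2.toNat val)
    [st.1]

-- ===== PRECONDITION & SPEC =====
def Spec_determineimpactoutputarr (fish : Int) (days : Int) (out : List Int) : Prop := out = determineimpactoutputarr_alt fish days
instance (fish : Int) (days : Int) (out : List Int) : Decidable (Spec_determineimpactoutputarr fish days out) := by unfold Spec_determineimpactoutputarr; infer_instance

-- ===== CLAIM (what is proved, stated in full; the proofs are below) =====
def Claim_equal_determineimpactoutputarr : Prop := ∀ (fish : Int) (days : Int), Dom_determineimpactoutputarr fish days → Spec_determineimpactoutputarr fish days (determineimpactoutputarr fish days)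

-- ===== LEMMAS AND PROOFS =====

-- one fish's timer after one day
def pvStep (t : Int) : Int := if t = 0 then 6 else t - 1

-- the offspring block of A's array after k days
def pvTail (fish : Int) : Nat → List Int
  | 0 => []
  | k+1 => (pvTail fish k).map pvStep ++
      List.replicate ((if pvStep^[k] fish = 0 then 1 else 0) + (pvTail fish k).count 0) 8

-- number of fish born on day k+1
def pvCnt (fish : Int) (k : Nat) : Nat :=
  (if pvStep^[k] fish = 0 then 1 else 0) + (pvTail fish k).count 0

-- the body of A's inner loop
def pvBodyA (a : List Int) (i : Int) : List Int :=
  if PySem.List.pyGetD a i 0 = 0 then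
    PySem.List.pySetD (a ++ [8]) i 6
  else
    PySem.List.pySetD a i (PySem.List.pyGetD a i 0 - 1)

-- A's one-day transformation
def pvDay (w : List Int) : List Int :=
  (PySem.List.pyRange 0 (w.length : Int) 1).foldl pvBodyA w

-- B's per-timer census of a list
def pvCounts (t : List Int) : List Int :=
  [(t.count 0 : Int), t.count 1, t.count 2, t.count 3, t.count 4,
   t.count 5, t.count 6, t.count 7, t.count 8]

-- the body of B's day loop
def pvBodyB (st : Int × List Int × List Int) : Int × List Int × List Int :=
  let o := st.1
  let counts := st.2.1
  let births := st.2.2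
  let b := PySem.List.pyGetD counts 0 0 + (if o = 0 then 1 else 0)
  let o' := if o = 0 then 6 else o - 1
  let nw := PySem.List.slice counts (some 1) none ++ [b]
  let nw2 := PySem.List.pySetD nw 6 (PySem.List.pyGetD nw 6 0 + PySem.List.pyGetD counts 0 0)
  (o', nw2, births ++ [b])

theorem pv_foldl_const {α β : Type} (l : List β) (f : α → α) (x : α) :
    l.foldl (fun a _ => f a) x = f^[l.length] x := by
  induction l generalizing x with
  | nil => rfl
  | cons y t ih => simp [List.foldl_cons, ih, Function.iterate_succ_apply]

theorem pv_inner_general (post pre ex : List Int) :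
    (PySem.List.pyRange (pre.length : Int) ((pre.length + post.length : Nat) : Int) 1).foldl
      pvBodyA (pre ++ (post ++ ex)) =
    pre ++ (post.map pvStep ++ (ex ++ List.replicate (post.count 0) 8)) := by
  induction post generalizing pre ex with
  | nil => simp [PySem.List.pyRange_one_eq_nil (le_refl _)]
  | cons h t ih =>
    have hlt : (pre.length : Int) < ((pre.length + (h :: t).length : Nat) : Int) := by
      simp only [List.length_cons]; push_cast; omega
    rw [PySem.List.pyRange_one_cons hlt, List.foldl_cons]
    have hget : PySem.List.pyGetD (pre ++ (h :: t ++ ex)) (pre.length : Int) 0 = h := by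
      unfold PySem.List.pyGetD
      rw [show pre ++ (h :: t ++ ex) = pre ++ h :: (t ++ ex) by simp,
          PySem.List.pyGet?_append_length]
      rfl
    by_cases hz : h = 0
    · subst hz
      have hstep : pvBodyA (pre ++ (0 :: t ++ ex)) (pre.length : Int) =
          (pre ++ [(6 : Int)]) ++ (t ++ (ex ++ [8])) := by
        unfold pvBodyA
        rw [if_pos (by rw [hget])]
        unfold PySem.List.pySetD
        rw [show (pre ++ (0 :: t ++ ex)) ++ [(8 : Int)] = pre ++ 0 :: (t ++ (ex ++ [8])) by simp]
        rw [PySem.List.pySet?_natCast _ pre.length 6 (by simp)]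
        simp [List.set_append]
      rw [hstep]
      have hrange : PySem.List.pyRange ((pre.length : Int) + 1)
            ((pre.length + (0 :: t).length : Nat) : Int) 1 =
          PySem.List.pyRange ((pre ++ [(6 : Int)]).length : Int)
            (((pre ++ [(6 : Int)]).length + t.length : Nat) : Int) 1 := by
        congr 1
        all_goals (simp only [List.length_append, List.length_cons, List.length_nil]; push_cast; omega)
      rw [hrange, ih]
      simp [pvStep, List.replicate_succ]
    · have hstep : pvBodyA (pre ++ (h :: t ++ ex)) (pre.length : Int) =
          (pre ++ [h - 1]) ++ (t ++ ex) := by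
        unfold pvBodyA
        rw [if_neg (by rw [hget]; exact hz)]
        rw [hget]
        unfold PySem.List.pySetD
        rw [show pre ++ (h :: t ++ ex) = pre ++ h :: (t ++ ex) by simp]
        rw [PySem.List.pySet?_natCast _ pre.length (h - 1) (by simp)]
        simp [List.set_append]
      rw [hstep]
      have hrange : PySem.List.pyRange ((pre.length : Int) + 1)
            ((pre.length + (h :: t).length : Nat) : Int) 1 =
          PySem.List.pyRange ((pre ++ [h - 1]).length : Int)
            (((pre ++ [h - 1]).length + t.length : Nat) : Int) 1 := by
        congr 1
        all_goals (simp only [List.length_append, List.length_cons, List.length_nil]; push_cast; omega)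
      rw [hrange, ih]
      simp [pvStep, hz]

theorem pv_day_eq (w : List Int) :
    pvDay w = w.map pvStep ++ List.replicate (w.count 0) 8 := by
  have h := pv_inner_general w [] []
  simp only [List.length_nil, List.nil_append, List.append_nil, Nat.zero_add, Nat.cast_zero] at h
  unfold pvDay
  rw [← h]

theorem pv_A_state (fish : Int) (n : Nat) :
    pvDay^[n] [fish] = pvStep^[n] fish :: pvTail fish n := by
  induction n with
  | zero => simp [pvTail]
  | succ k ih =>
    rw [Function.iterate_succ_apply', ih, pv_day_eq]
    simp only [List.map_cons, List.count_cons, pvTail, Function.iterate_succ_apply']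
    rw [List.cons_append]
    congr 2
    congr 1
    simp only [beq_iff_eq]
    split_ifs <;> omega

theorem pv_tail_mem (fish : Int) (n : Nat) :
    ∀ x ∈ pvTail fish n, 0 ≤ x ∧ x ≤ 8 := by
  induction n with
  | zero => simp [pvTail]
  | succ k ih =>
    intro x hx
    unfold pvTail at hx
    rcases List.mem_append.1 hx with hx | hx
    · obtain ⟨y, hy, rfl⟩ := List.mem_map.1 hx
      have := ih y hy
      unfold pvStep
      split_ifs <;> omega
    · have := (List.eq_of_mem_replicate hx)
      omega

theorem pv_countShift (t : List Int) (h : ∀ x ∈ t, 0 ≤ x ∧ x ≤ 8) :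
    (t.map pvStep).count 0 = t.count 1 ∧ (t.map pvStep).count 1 = t.count 2 ∧
    (t.map pvStep).count 2 = t.count 3 ∧ (t.map pvStep).count 3 = t.count 4 ∧
    (t.map pvStep).count 4 = t.count 5 ∧ (t.map pvStep).count 5 = t.count 6 ∧
    (t.map pvStep).count 6 = t.count 7 + t.count 0 ∧ (t.map pvStep).count 7 = t.count 8 ∧
    (t.map pvStep).count 8 = 0 := by
  induction t with
  | nil => simp
  | cons x t ih =>
    obtain ⟨hx0, hx8⟩ := h x (List.mem_cons_self)
    obtain ⟨e0, e1, e2, e3, e4, e5, e6, e7, e8⟩ :=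
      ih (fun y hy => h y (List.mem_cons_of_mem _ hy))
    simp only [List.map_cons, List.count_cons, e0, e1, e2, e3, e4, e5, e6, e7, e8]
    interval_cases x <;> simp [pvStep] <;> omega

theorem pv_bodyB_eval (o c0 c1 c2 c3 c4 c5 c6 c7 c8 : Int) (bs : List Int) :
    pvBodyB (o, [c0, c1, c2, c3, c4, c5, c6, c7, c8], bs) =
      ((if o = 0 then 6 else o - 1),
       [c1, c2, c3, c4, c5, c6, c7 + c0, c8, c0 + (if o = 0 then 1 else 0)],
       bs ++ [c0 + (if o = 0 then 1 else 0)]) := by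
  unfold pvBodyB
  simp [PySem.List.slice_from_one, PySem.List.pyGetD, PySem.List.pyGet?, PySem.List.pyIdx?,
        PySem.List.pySetD, PySem.List.pySet?]

theorem pv_B_state (fish : Int) (n : Nat) :
    pvBodyB^[n] (fish, List.replicate 9 (0 : Int), ([] : List Int)) =
      (pvStep^[n] fish, pvCounts (pvTail fish n),
       (List.range n).map fun j => (pvCnt fish j : Int)) := by
  induction n with
  | zero => simp [pvCounts, pvTail]
  | succ k ih =>
    rw [Function.iterate_succ_apply', ih]
    rw [show pvCounts (pvTail fish k) =
        [((pvTail fish k).count 0 : Int), (pvTail fish k).count 1, (pvTail fish k).count 2,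
         (pvTail fish k).count 3, (pvTail fish k).count 4, (pvTail fish k).count 5,
         (pvTail fish k).count 6, (pvTail fish k).count 7, (pvTail fish k).count 8] from rfl]
    rw [pv_bodyB_eval]
    obtain ⟨e0, e1, e2, e3, e4, e5, e6, e7, e8⟩ :=
      pv_countShift (pvTail fish k) (pv_tail_mem fish k)
    refine Prod.ext ?_ (Prod.ext ?_ ?_)
    · simp only [Function.iterate_succ_apply']
      rfl
    · show _ = pvCounts (pvTail fish (k+1))
      rw [show pvTail fish (k+1) =
          (pvTail fish k).map pvStep ++ List.replicate (pvCnt fish k) 8 from by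
        simp [pvTail, pvCnt]]
      simp only [pvCounts, List.count_append, List.count_replicate,
        e0, e1, e2, e3, e4, e5, e6, e7, e8]
      norm_num [pvCnt]
      ring
    · show _ = (List.range (k+1)).map fun j => (pvCnt fish j : Int)
      rw [List.range_succ, List.map_append]
      simp only [List.map_cons, List.map_nil]
      congr 2
      unfold pvCnt
      split_ifs <;> push_cast <;> omega

theorem pv_tail_flat (fish : Int) (n : Nat) :
    pvTail fish n =
      (List.range n).flatMap (fun j => List.replicate (pvCnt fish j) (pvStep^[n-1-j] 8)) := by
  induction n with
  | zero => simp [pvTail]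
  | succ k ih =>
    have : pvTail fish (k+1) = (pvTail fish k).map pvStep ++ List.replicate (pvCnt fish k) 8 := by
      simp [pvTail, pvCnt]
    rw [this, ih, List.map_flatMap, List.range_succ, List.flatMap_append]
    congr 1
    · apply List.flatMap_congr
      intro j hj
      have hjk : j < k := List.mem_range.1 hj
      rw [List.map_replicate]
      congr 1
      rw [← Function.iterate_succ_apply' pvStep]
      congr 1
      omega
    · simp

theorem pv_iterate_sub (m : Nat) (t : Int) (h : (m : Int) ≤ t) :
    pvStep^[m] t = t - m := by
  induction m with
  | zero => simp
  | succ k ih =>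
    have hk : (k : Int) ≤ t := by push_cast at h ⊢; omega
    rw [Function.iterate_succ_apply', ih hk]
    have hne : t - (k : Int) ≠ 0 := by push_cast at h; omega
    unfold pvStep
    simp only [hne, if_false]
    push_cast
    ring

theorem pv_gform (m : Nat) :
    pvStep^[m] 8 = if (m : Int) < 9 then 8 - (m : Int) else 6 - PySem.Int.mod ((m : Int) - 9) 7 := by
  induction m using Nat.strong_induction_on with
  | _ m ih =>
    by_cases h9 : m < 9
    · rw [pv_iterate_sub m 8 (by omega)]
      rw [if_pos (by omega)]
    · obtain ⟨k, rfl⟩ : ∃ k, m = k + 1 := ⟨m - 1, by omega⟩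
      rw [Function.iterate_succ_apply', ih k (by omega)]
      rw [if_neg (show ¬(((k + 1 : Nat) : Int) < 9) by omega)]
      by_cases hk9 : k < 9
      · have hk : k = 8 := by omega
        subst hk
        decide
      · rw [if_neg (show ¬(((k : Nat) : Int) < 9) by omega)]
        rw [show ((k : Int) - 9) = ((k - 9 : Nat) : Int) by push_cast; omega,
            show (((k : Nat) + 1 : Nat) : Int) - 9 = ((k - 8 : Nat) : Int) by push_cast; omega]
        have hm1 : PySem.Int.mod ((k - 9 : Nat) : Int) 7 = (((k - 9) % 7 : Nat) : Int) := by
          exact_mod_cast PySem.Int.mod_natCast (k - 9) 7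
        have hm2 : PySem.Int.mod ((k - 8 : Nat) : Int) 7 = (((k - 8) % 7 : Nat) : Int) := by
          exact_mod_cast PySem.Int.mod_natCast (k - 8) 7
        rw [hm1, hm2]
        have ha : (k - 9) % 7 < 7 := Nat.mod_lt _ (by norm_num)
        have hb : (k - 8) % 7 < 7 := Nat.mod_lt _ (by norm_num)
        unfold pvStep
        split_ifs with h0
        · push_cast at h0 ⊢; omega
        · push_cast at h0 ⊢; omega

theorem pv_enumerate_append (xs ys : List Int) (s : Int) :
    PySem.List.enumerate (xs ++ ys) s =
      PySem.List.enumerate xs s ++ PySem.List.enumerate ys (s + (xs.length : Int)) := by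
  induction xs generalizing s with
  | nil => simp [PySem.List.enumerate_nil]
  | cons x t ih =>
    simp only [List.cons_append, PySem.List.enumerate_cons, ih, List.length_cons]
    congr 2
    push_cast
    ring

theorem pv_enumerate_map_range (f : Nat → Int) (n : Nat) :
    PySem.List.enumerate ((List.range n).map f) 0 =
      (List.range n).map (fun (k : Nat) => ((k : Int), f k)) := by
  induction n with
  | zero => simp [PySem.List.enumerate_nil]
  | succ k ih =>
    rw [List.range_succ, List.map_append, List.map_append, pv_enumerate_append, ih]
    simp [PySem.List.enumerate_cons, PySem.List.enumerate_nil]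

theorem pv_main : ∀ (fish days : Int),
    determineimpactoutputarr fish days = determineimpactoutputarr_alt fish days := by
  intro fish days
  set n := days.toNat with hn
  have hA : determineimpactoutputarr fish days = pvStep^[n] fish :: pvTail fish n := by
    unfold determineimpactoutputarr
    show (PySem.List.pyRange 0 days 1).foldl (fun w _ => pvDay w) [fish] = _
    rw [pv_foldl_const, PySem.List.length_pyRange_one]
    rw [show (days - 0).toNat = n by rw [hn]; norm_num]
    exact pv_A_state fish n
  have hBst := pv_B_state fish n
  have hB : determineimpactoutputarr_alt fish days =
      (PySem.List.enumerate ((List.range n).map fun j => (pvCnt fish j : Int)) 0).foldl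
        (fun out p => out ++ List.replicate p.2.toNat
          (if days - (p.1 + 1) < 9 then 8 - (days - (p.1 + 1))
           else 6 - PySem.Int.mod (days - (p.1 + 1) - 9) 7))
        [pvStep^[n] fish] := by
    unfold determineimpactoutputarr_alt
    show (PySem.List.enumerate
        (((PySem.List.pyRange 0 days 1).foldl (fun st _ => pvBodyB st)
          (fish, List.replicate 9 (0 : Int), ([] : List Int))).2.2) 0).foldl
        (fun out p => out ++ List.replicate p.2.toNat
          (if days - (p.1 + 1) < 9 then 8 - (days - (p.1 + 1))
           else 6 - PySem.Int.mod (days - (p.1 + 1) - 9) 7))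
        [((PySem.List.pyRange 0 days 1).foldl (fun st _ => pvBodyB st)
          (fish, List.replicate 9 (0 : Int), ([] : List Int))).1] = _
    rw [pv_foldl_const, PySem.List.length_pyRange_one]
    rw [show (days - 0).toNat = n by rw [hn]; norm_num]
    rw [hBst]
  rw [hA, hB, pv_tail_flat fish n, pv_enumerate_map_range, List.foldl_map]
  simp only []
  rw [PySem.List.foldl_append_eq_flatMap
    (g := fun (k : Nat) => List.replicate ((pvCnt fish k : Int)).toNat
      (if days - ((k : Int) + 1) < 9 then 8 - (days - ((k : Int) + 1))
       else 6 - PySem.Int.mod (days - ((k : Int) + 1) - 9) 7))]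
  rw [List.singleton_append]
  congr 1
  refine (List.flatMap_congr ?_)
  intro j hj
  have hjn : j < n := List.mem_range.1 hj
  have hdays : days = (n : Int) := by omega
  rw [Int.toNat_natCast]
  rw [hdays, show ((n : Int) - ((j : Int) + 1)) = ((n - 1 - j : Nat) : Int) by omega]
  rw [← pv_gform (n - 1 - j)]

-- ===== VERDICT (by name: the statement is the Claim_ definition above) =====
theorem determineimpactoutputarr_spec : Claim_equal_determineimpactoutputarr := by
  intro fish days _
  unfold Spec_determineimpactoutputarr
  exact pv_main fish days
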